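-- pv_equiv track=rewrite | github.com/SHPumpkin/Floorplan-Detection | floorplan/DetectRooms.py | countZero1
-- ===== SOURCE A (Python) =====
-- def countZero1(a):
--     res = []
--     count = 0
--     non_white = -1
--     for x in a:
--         if (x == 0):
--             count = count + 1
--             if (non_white == -1):
--                 non_white = 0
--         else:
--             if (non_white == 0):
--                 non_white = 1
--             elif (non_white == 1):
--                 if (count > 0):
--                     res.append(count)
--                     count = 0
--                 non_white = -1
--     return res
-- ===== SOURCE B (Python) =====
-- def countZero1(a):
--     # Pass 1: compress a into maximal runs (is_zero, length).
--     runs = []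
--     for x in a:
--         z = (x == 0)
--         if runs and runs[-1][0] == z:
--             runs[-1] = (z, runs[-1][1] + 1)
--         else:
--             runs.append((z, 1))
--     # Pass 2: waiting/active scan over runs; 'need' = non-zero elements still
--     # required before the accumulated zero count is emitted (starts at 2).
--     res = []
--     state = None  # None = waiting, else (count, need)
--     for z, n in runs:
--         if z:
--             state = (n, 2) if state is None else (state[0] + n, state[1])
--         elif state is not None:
--             count, need = state
--             if n >= need:
--                 res.append(count)
--                 state = None
--             else:
--                 state = (count, need - n)
--     return res
-- ===== Notes on version B (the rewrite author's own statement) =====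
-- stated objective: alternative
-- what changed: A's single element-wise loop over a three-valued state machine is replaced by a run-length compression pass followed by a waiting/active scan over (is_zero, length) runs with a counter of non-zero boundaries still needed.
import Mathlib
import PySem

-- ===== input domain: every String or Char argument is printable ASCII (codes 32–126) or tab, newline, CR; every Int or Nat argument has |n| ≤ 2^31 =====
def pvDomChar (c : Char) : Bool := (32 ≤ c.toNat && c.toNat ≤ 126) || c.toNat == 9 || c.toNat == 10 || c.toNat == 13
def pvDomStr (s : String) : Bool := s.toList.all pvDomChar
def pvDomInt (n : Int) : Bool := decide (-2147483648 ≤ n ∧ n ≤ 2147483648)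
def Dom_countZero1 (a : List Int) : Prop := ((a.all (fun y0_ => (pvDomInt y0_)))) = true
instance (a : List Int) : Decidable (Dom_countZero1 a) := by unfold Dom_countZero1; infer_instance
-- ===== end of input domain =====

-- B replaces A's three-valued state machine over elements by a run-length compression pass
-- followed by a waiting/active scan over runs (objective: alternative decomposition, same O(n)).

-- ===== PORT A =====
-- one step of A's for-loop on the state (res, count, non_white)
def stepA (s : List Int × Int × Int) (x : Int) : List Int × Int × Int :=
  if x = 0 then
    (s.1, s.2.1 + 1, if s.2.2 = -1 then 0 else s.2.2)
  else
    if s.2.2 = 0 then (s.1, s.2.1, 1)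
    else if s.2.2 = 1 then
      (if s.2.1 > 0 then (s.1 ++ [s.2.1], 0, -1) else (s.1, s.2.1, -1))
    else s

def countZero1 (a : List Int) : List Int :=
  (a.foldl stepA ([], 0, -1)).1

-- ===== PORT B =====
-- append element x to the run list: extend the LAST run if its key matches, else append a new run
def pushRun (rs : List (Bool × Int)) (x : Int) : List (Bool × Int) :=
  match rs with
  | [] => [(decide (x = 0), 1)]
  | [(b, n)] =>
      if b = decide (x = 0) then [(b, n + 1)] else [(b, n), (decide (x = 0), 1)]
  | r :: t => r :: pushRun t x

-- pass 1 of B: run-length compression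
def runsOf (a : List Int) : List (Bool × Int) := a.foldl pushRun []

-- pass 2 of B: one run; state none = waiting, some (count, need) = active
def runStep (s : List Int × Option (Int × Int)) (r : Bool × Int) : List Int × Option (Int × Int) :=
  if r.1 then
    match s.2 with
    | none => (s.1, some (r.2, 2))
    | some (c, need) => (s.1, some (c + r.2, need))
  else
    match s.2 with
    | none => s
    | some (c, need) => if r.2 ≥ need then (s.1 ++ [c], none) else (s.1, some (c, need - r.2))

def countZero1_alt (a : List Int) : List Int :=
  ((runsOf a).foldl runStep ([], none)).1

-- ===== PRECONDITION & SPEC =====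
def Spec_countZero1 (a : List Int) (out : List Int) : Prop := out = countZero1_alt a
instance (a : List Int) (out : List Int) : Decidable (Spec_countZero1 a out) := by unfold Spec_countZero1; infer_instance

-- ===== CLAIM (what is proved, stated in full; the proofs are below) =====
def Claim_equal_countZero1 : Prop := ∀ (a : List Int), Dom_countZero1 a → Spec_countZero1 a (countZero1 a)

-- ===== LEMMAS AND PROOFS =====

-- growing a run by one element = processing the run then one length-1 run of the same key
theorem runStep_succ (b : Bool) (n : Int) (s : List Int × Option (Int × Int)) :
    runStep s (b, n + 1) = runStep (runStep s (b, n)) (b, 1) := by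
  rcases s with ⟨res, st⟩
  rcases st with _ | ⟨c, need⟩ <;> cases b
  · simp [runStep]
  · simp [runStep]
  · by_cases h1 : (n : Int) ≥ need
    · have h2 : n + 1 ≥ need := by omega
      simp [runStep, h1, h2]
    · by_cases h2 : n + 1 ≥ need
      · have h3 : (1 : Int) ≥ need - n := by omega
        simp [runStep, h1, h2, h3]
      · have h3 : ¬ ((1 : Int) ≥ need - n) := by omega
        simp [runStep, h1, h2, h3]
        omega
  · simp [runStep]
    ring

-- folding runStep over (pushRun rs x) = folding over rs, then one element-step for x
theorem foldl_pushRun (rs : List (Bool × Int)) (x : Int)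
    (s : List Int × Option (Int × Int)) :
    (pushRun rs x).foldl runStep s = runStep (rs.foldl runStep s) (decide (x = 0), 1) := by
  induction rs generalizing s with
  | nil => simp [pushRun]
  | cons r t ih =>
    rcases r with ⟨b, n⟩
    cases t with
    | nil =>
      by_cases h : b = decide (x = 0)
      · subst h
        simp [pushRun, List.foldl, runStep_succ]
      · simp [pushRun, h, List.foldl]
    | cons r' t' =>
      simp only [pushRun, List.foldl]
      exact ih _

-- B over the whole input = element-wise fold of length-1 runs
theorem alt_elemwise (a : List Int) (s : List Int × Option (Int × Int)) (rs : List (Bool × Int)) :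
    (a.foldl pushRun rs).foldl runStep s
      = a.foldl (fun t x => runStep t (decide (x = 0), 1)) (rs.foldl runStep s) := by
  induction a generalizing rs with
  | nil => simp
  | cons x t ih =>
    simp only [List.foldl]
    rw [ih, foldl_pushRun]

-- the simulation relation between A's state and B's state
def RelAB (sA : List Int × Int × Int) (sB : List Int × Option (Int × Int)) : Prop :=
  sA.1 = sB.1 ∧
    ((sA.2.2 = -1 ∧ sA.2.1 = 0 ∧ sB.2 = none) ∨
     (sA.2.2 = 0 ∧ 1 ≤ sA.2.1 ∧ sB.2 = some (sA.2.1, 2)) ∨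
     (sA.2.2 = 1 ∧ 1 ≤ sA.2.1 ∧ sB.2 = some (sA.2.1, 1)))

theorem rel_step (sA : List Int × Int × Int) (sB : List Int × Option (Int × Int)) (x : Int)
    (h : RelAB sA sB) : RelAB (stepA sA x) (runStep sB (decide (x = 0), 1)) := by
  rcases sA with ⟨resA, c, nw⟩
  rcases sB with ⟨resB, st⟩
  rcases h with ⟨hres, h | h | h⟩ <;>
      obtain ⟨h1, h2, h3⟩ := h <;>
      simp only at h1 h2 h3 hres <;> subst h1 h3 hres <;>
      by_cases hx : x = 0
  · simp [stepA, runStep, RelAB, hx]; omega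
  · simp [stepA, runStep, RelAB, hx]; omega
  · simp [stepA, runStep, RelAB, hx]; omega
  · simp [stepA, runStep, RelAB, hx]; omega
  · simp [stepA, runStep, RelAB, hx]; omega
  · simp [stepA, runStep, RelAB, hx, show (0:Int) < c by omega]

theorem rel_fold (a : List Int) (sA : List Int × Int × Int) (sB : List Int × Option (Int × Int))
    (h : RelAB sA sB) :
    RelAB (a.foldl stepA sA) (a.foldl (fun t x => runStep t (decide (x = 0), 1)) sB) := by
  induction a generalizing sA sB with
  | nil => exact h
  | cons x t ih => exact ih _ _ (rel_step _ _ _ h)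

-- ===== VERDICT (by name: the statement is the Claim_ definition above) =====
theorem countZero1_spec : Claim_equal_countZero1 := by
  intro a _
  unfold Spec_countZero1 countZero1 countZero1_alt runsOf
  rw [alt_elemwise a ([], none) []]
  have h := rel_fold a ([], 0, -1) ([], none) (by simp [RelAB])
  simp only [List.foldl] at h ⊢
  exact h.1
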